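-- pv_equiv track=rewrite | github.com/glezluis/grimms-conjecture | grimm.py | consecutive_composites
-- ===== SOURCE A (Python) =====
-- def factors(x):
--     #for a number x, returns a list of x's factors
--     i = 1
--     list = [];
--     for i in range(i,x+1):
--         if x % i == 0:
--             list.append(i)
--             i += 1
--         else:
--             i += 1
--     return list
--
-- def composite_list(x):
--     #using function factors(x), returns composite factors from 1 to x
--     composite_factors = [];
--     i = 1
--     for i in range(i, x+1):
--         if len(factors(i)) > 2:
--             composite_factors.append(i)
--     return composite_factors
--
-- def consecutive_composites(x):
--     # takes a list of composite numbers and determines the consecutive sets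
--     tupl= ();
--     a= dict();
--
--     for j in range(0, len(composite_list(x))-1):
--         i= composite_list(x)[j]
--         k= composite_list(x)[j+1]
--
--         if k-i == 1:
--             mykeys = list(a.keys())
--             if len(a) !=0 and i- mykeys[-1] > 1:
--                 tupl = tupl + (a,)
--                 a= dict();
--             a[i]= 0
--             a[k]= 0
--     tupl = tupl + (a,)
--     return tupl
-- ===== SOURCE B (Python) =====
-- def consecutive_composites(x):
--     # compute the composites once, then group consecutive runs in one linear pass
--     comps = [n for n in range(2, x + 1) if any(n % d == 0 for d in range(2, n))]
--     groups = []
--     run = []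
--     for n in comps:
--         if run and n - run[-1] == 1:
--             run.append(n)
--         else:
--             if len(run) >= 2:
--                 groups.append({m: 0 for m in run})
--             run = [n]
--     if len(run) >= 2:
--         groups.append({m: 0 for m in run})
--     return tuple(groups) if groups else ({},)
-- ===== Notes on version B (the rewrite author's own statement) =====
-- stated objective: faster
-- what changed: B computes the composite list once (trial-division membership test with early exit) and groups consecutive runs in a single linear pass over it, instead of A's rebuilding of the entire composite list (itself built by enumerating and counting all divisors of every number up to x) on every access inside the grouping loop.
import Mathlib
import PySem

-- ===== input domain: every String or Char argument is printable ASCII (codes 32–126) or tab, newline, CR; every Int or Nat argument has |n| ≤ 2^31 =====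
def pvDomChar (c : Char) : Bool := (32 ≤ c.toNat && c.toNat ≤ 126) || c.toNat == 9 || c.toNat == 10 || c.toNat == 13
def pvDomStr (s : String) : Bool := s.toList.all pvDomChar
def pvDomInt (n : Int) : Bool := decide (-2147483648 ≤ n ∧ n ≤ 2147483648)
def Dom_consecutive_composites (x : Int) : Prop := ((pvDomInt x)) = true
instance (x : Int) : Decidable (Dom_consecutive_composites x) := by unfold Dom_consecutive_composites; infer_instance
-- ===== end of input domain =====

-- B computes the composite list once and groups consecutive runs in a single pass,
-- instead of A's recomputation of the whole composite list (itself built by counting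
-- all divisors of every number) at every loop iteration.

-- ===== PORT A =====
-- factors(x): the `i += 1` statements are no-ops (range reassigns i); the loop filters divisors.
def factorsA (x : Int) : List Int :=
  (PySem.List.pyRange 1 (x + 1)).foldl
    (fun l i => if PySem.Int.mod x i == 0 then l ++ [i] else l) []

def composite_listA (x : Int) : List Int :=
  (PySem.List.pyRange 1 (x + 1)).foldl
    (fun l i => if 2 < (factorsA i).length then l ++ [i] else l) []

-- one iteration of A's loop body (composite_list(x) is recomputed on each access, as in A);
-- j and j+1 are always in range (j < len-1), so the IndexError branch of pyGet? is unreachable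
def stepA (x : Int) (s : List (PySem.Dict Int Int) × PySem.Dict Int Int) (j : Int) :
    List (PySem.Dict Int Int) × PySem.Dict Int Int :=
  let i := (PySem.List.pyGet? (composite_listA x) j).getD 0
  let k := (PySem.List.pyGet? (composite_listA x) (j + 1)).getD 0
  if k - i == 1 then
    let mykeys := s.2.keys
    let s' := if s.2.items.length ≠ 0 ∧ 1 < i - (PySem.List.pyGet? mykeys (-1)).getD 0
              then (s.1 ++ [s.2], (⟨[]⟩ : PySem.Dict Int Int))
              else s
    (s'.1, (s'.2.insert i 0).insert k 0)
  else s

def consecutive_composites (x : Int) : List (List (Int × Int)) :=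
  let r := (PySem.List.pyRange 0 (((composite_listA x).length : Int) - 1)).foldl
             (stepA x) ([], (⟨[]⟩ : PySem.Dict Int Int))
  (r.1 ++ [r.2]).map PySem.Dict.items

-- ===== PORT B =====
-- one iteration of B's loop: extend the current run or flush it (kept only if length ≥ 2)
def stepB (s : List (List (Int × Int)) × List Int) (n : Int) :
    List (List (Int × Int)) × List Int :=
  if s.2 ≠ [] ∧ n - (PySem.List.pyGet? s.2 (-1)).getD 0 = 1 then
    (s.1, s.2 ++ [n])
  else
    ((if 2 ≤ s.2.length then s.1 ++ [s.2.map (fun m => (m, 0))] else s.1), [n])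

-- {m: 0 for m in run}: run is strictly increasing, so the dict's items are exactly this map
def consecutive_composites_alt (x : Int) : List (List (Int × Int)) :=
  let comps := (PySem.List.pyRange 2 (x + 1)).filter
      (fun n => (PySem.List.pyRange 2 n).any (fun d => PySem.Int.mod n d == 0))
  let r := comps.foldl stepB ([], [])
  let groups := if 2 ≤ r.2.length then r.1 ++ [r.2.map (fun m => (m, 0))] else r.1
  if groups = [] then [[]] else groups

-- ===== PRECONDITION & SPEC =====
def Spec_consecutive_composites (x : Int) (out : List (List (Int × Int))) : Prop := out = consecutive_composites_alt x
instance (x : Int) (out : List (List (Int × Int))) : Decidable (Spec_consecutive_composites x out) := by unfold Spec_consecutive_composites; infer_instance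

-- ===== CLAIM (what is proved, stated in full; the proofs are below) =====
def Claim_equal_consecutive_composites : Prop := ∀ (x : Int), Dom_consecutive_composites x → Spec_consecutive_composites x (consecutive_composites x)

-- ===== LEMMAS AND PROOFS =====

-- A's loop body as a function of the adjacent pair (definitionally equal to stepA x at
-- in-range indices; used to restate A's index loop as a fold over adjacent pairs)
def stepP (s : List (PySem.Dict Int Int) × PySem.Dict Int Int) (p : Int × Int) :
    List (PySem.Dict Int Int) × PySem.Dict Int Int :=
  if p.2 - p.1 == 1 then
    let mykeys := s.2.keys
    let s' := if s.2.items.length ≠ 0 ∧ 1 < p.1 - (PySem.List.pyGet? mykeys (-1)).getD 0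
              then (s.1 ++ [s.2], (⟨[]⟩ : PySem.Dict Int Int))
              else s
    (s'.1, (s'.2.insert p.1 0).insert p.2 0)
  else s

-- B's final flush and empty-group default, as a function of B's loop state
def finishB (r : List (List (Int × Int)) × List Int) : List (List (Int × Int)) :=
  let groups := if 2 ≤ r.2.length then r.1 ++ [r.2.map (fun m => (m, 0))] else r.1
  if groups = [] then [[]] else groups

-- The dict whose keys are `run` (all values 0)
def dictOf (run : List Int) : PySem.Dict Int Int := ⟨run.map (fun m => (m, 0))⟩

lemma keys_dictOf (r : List Int) : (dictOf r).keys = r := by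
  simp [dictOf, PySem.Dict.keys, Function.comp_def]

lemma insert_dictOf_mem (r : List Int) (p : Int) (h : p ∈ r) :
    (dictOf r).insert p 0 = dictOf r := by
  have hc : (dictOf r).contains p = true := by simpa [PySem.Dict.contains, dictOf] using h
  simp only [PySem.Dict.insert, hc, if_true]
  simp only [dictOf, List.map_map, PySem.Dict.mk.injEq]
  apply List.map_congr_left; intro m hm
  by_cases hmp : m = p <;> simp [hmp]

lemma insert_dictOf_not_mem (r : List Int) (n : Int) (h : n ∉ r) :
    (dictOf r).insert n 0 = dictOf (r ++ [n]) := by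
  have hc : (dictOf r).contains n = false := by
    simp [PySem.Dict.contains, dictOf]
    exact fun x hx hxn => h (hxn ▸ hx)
  simp only [PySem.Dict.insert, hc, Bool.false_eq_true, if_false]
  simp [dictOf]

lemma le_of_pairwise_getLast {l : List Int} (hp : List.Pairwise (· < ·) l)
    {p : Int} (hl : l.getLast? = some p) : ∀ m ∈ l, m ≤ p := by
  induction l with
  | nil => simp at hl
  | cons a t ih =>
    rcases List.pairwise_cons.mp hp with ⟨ha, ht⟩
    cases t with
    | nil => simp at hl; subst hl; simp
    | cons b t' =>
      have hl' : (b :: t').getLast? = some p := by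
        rw [List.getLast?_cons_cons] at hl; exact hl
      intro m hm
      rcases List.mem_cons.mp hm with rfl | hm'
      · have h1 : b ≤ p := ih ht hl' b (by simp)
        have h2 : m < b := ha b (by simp)
        omega
      · exact ih ht hl' m hm'

-- A's factors loop is a filter
lemma factorsA_eq (x : Int) :
    factorsA x = (PySem.List.pyRange 1 (x + 1)).filter (fun i => PySem.Int.mod x i == 0) := by
  simpa [factorsA] using
    PySem.List.foldl_append_if (fun i => PySem.Int.mod x i == 0) id (PySem.List.pyRange 1 (x + 1)) []

-- A's composite-membership test agrees with B's trial division for n ≥ 2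
lemma pred_eq (n : Int) (h2 : 2 ≤ n) :
    decide (2 < (factorsA n).length)
      = (PySem.List.pyRange 2 n).any (fun d => PySem.Int.mod n d == 0) := by
  rw [factorsA_eq]
  rw [PySem.List.pyRange_one_cons (by omega : (1:Int) < n + 1)]
  rw [show (1:Int) + 1 = 2 by norm_num]
  rw [PySem.List.pyRange_one_succ_right (by omega : (2:Int) ≤ n)]
  have h1 : (PySem.Int.mod n 1 == 0) = true := by
    simp
  have hn : (PySem.Int.mod n n == 0) = true := by
    simp [PySem.Int.mod_eq_zero_iff_dvd]
  simp only [List.filter_cons, List.filter_append, h1, List.filter_nil, hn]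
  simp only [if_true]
  simp only [List.length_cons, List.length_append, List.length_nil]
  rcases (List.filter (fun d => PySem.Int.mod n d == 0) (PySem.List.pyRange 2 n)).eq_nil_or_concat
      with hnil | ⟨l', b, hb⟩
  · rw [hnil]
    simp only [List.length_nil]
    have hno : ¬ (PySem.List.pyRange 2 n).any (fun d => PySem.Int.mod n d == 0) = true := by
      simp only [List.any_eq_true]
      rintro ⟨d, hd, hdd⟩
      have : d ∈ List.filter (fun d => PySem.Int.mod n d == 0) (PySem.List.pyRange 2 n) :=
        List.mem_filter.mpr ⟨hd, hdd⟩
      simp [hnil] at this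
    simp [hno]
  · have hany : (PySem.List.pyRange 2 n).any (fun d => PySem.Int.mod n d == 0) = true := by
      simp only [List.any_eq_true]
      have hbmem : b ∈ List.filter (fun d => PySem.Int.mod n d == 0) (PySem.List.pyRange 2 n) := by
        rw [hb]; simp
      exact ⟨b, (List.mem_filter.mp hbmem).1, (List.mem_filter.mp hbmem).2⟩
    have hlen : 0 < (List.filter (fun d => PySem.Int.mod n d == 0) (PySem.List.pyRange 2 n)).length := by
      rw [hb]; simp
    rw [hany]
    simp only [decide_eq_true_eq]
    omega

lemma composite_listA_eq (x : Int) :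
    composite_listA x
      = (PySem.List.pyRange 1 (x + 1)).filter (fun i => decide (2 < (factorsA i).length)) := by
  have := PySem.List.foldl_append_if (fun i => decide (2 < (factorsA i).length)) id
    (PySem.List.pyRange 1 (x + 1)) []
  simpa [composite_listA] using this

-- the two composite lists coincide
lemma comps_eq (x : Int) :
    composite_listA x
      = (PySem.List.pyRange 2 (x + 1)).filter
          (fun n => (PySem.List.pyRange 2 n).any (fun d => PySem.Int.mod n d == 0)) := by
  rw [composite_listA_eq]
  by_cases hx : 1 ≤ x
  · rw [PySem.List.pyRange_one_cons (by omega : (1:Int) < x + 1)]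
    rw [show (1:Int) + 1 = 2 by norm_num]
    have h1 : decide (2 < (factorsA 1).length) = false := by decide
    simp only [List.filter_cons, h1, Bool.false_eq_true, if_false]
    apply List.filter_congr
    intro n hn
    exact pred_eq n (PySem.List.mem_pyRange_one.mp hn).1
  · rw [PySem.List.pyRange_one_eq_nil (by omega : x + 1 ≤ 1),
        PySem.List.pyRange_one_eq_nil (by omega : x + 1 ≤ 2)]
    simp

-- A's index loop over range(0, len-1) is a fold over adjacent pairs
lemma foldl_idx_zip {σ : Type} (l : List Int) (f : σ → Int × Int → σ) (s : σ) :
    (PySem.List.pyRange 0 ((l.length : Int) - 1)).foldl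
      (fun s j => f s ((PySem.List.pyGet? l j).getD 0, (PySem.List.pyGet? l (j + 1)).getD 0)) s
    = (l.zip l.tail).foldl f s := by
  cases l with
  | nil =>
    rw [PySem.List.pyRange_one_eq_nil (by simp : ((([]:List Int)).length : Int) - 1 ≤ 0)]
    simp
  | cons c t =>
    have hlen : ((c :: t).length : Int) - 1 = (t.length : Nat) := by simp
    rw [hlen, PySem.List.pyRange_zero_natCast]
    rw [List.foldl_map]
    have hmap : (List.range t.length).map
        (fun (k : Nat) => ((PySem.List.pyGet? (c :: t) (k : Int)).getD 0,
                           (PySem.List.pyGet? (c :: t) ((k : Int) + 1)).getD 0))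
        = (c :: t).zip (c :: t).tail := by
      apply List.ext_getElem
      · simp [List.length_zip]
      · intro j hj1 hj2
        simp only [List.getElem_map, List.getElem_range, List.getElem_zip, List.tail_cons]
        have hj : j < t.length := by simpa using hj1
        have hget1 : (PySem.List.pyGet? (c :: t) (j : Int)).getD 0 = (c :: t)[j] := by
          rw [PySem.List.pyGet?_natCast]
          simp [List.getElem?_eq_getElem (by simp; omega : j < (c :: t).length)]
        have hcast : ((j : Int) + 1) = ((j + 1 : Nat) : Int) := by push_cast; ring
        have hget2 : (PySem.List.pyGet? (c :: t) ((j : Int) + 1)).getD 0 = t[j] := by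
          rw [hcast, PySem.List.pyGet?_natCast]
          have hsome : (c :: t)[j+1]? = some t[j] := by
            simp [List.getElem?_eq_getElem (by simp; omega : j + 1 < (c :: t).length)]
          simp [hsome]
        rw [hget1, hget2]
    rw [← List.foldl_map, hmap]

-- relation between A's loop state (t, a) and B's loop state (groups, run) after the
-- same processed prefix of the composite list, whose last element is p
def StInv (p : Int) (t : List (PySem.Dict Int Int)) (a : PySem.Dict Int Int)
    (groups : List (List (Int × Int))) (run : List Int) : Prop :=
  (2 ≤ run.length ∧ run.getLast? = some p ∧ List.Pairwise (· < ·) run ∧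
     t.map PySem.Dict.items = groups ∧ a = dictOf run)
  ∨ (run = [p] ∧
      ((groups = [] ∧ t = [] ∧ a = dictOf [])
       ∨ (∃ r m, r ≠ [] ∧ a = dictOf r ∧ r.getLast? = some m ∧ m + 1 < p ∧
            t.map PySem.Dict.items ++ [a.items] = groups)))

lemma main_ind (rest : List Int) :
    ∀ (p : Int) (t : List (PySem.Dict Int Int)) (a : PySem.Dict Int Int)
      (groups : List (List (Int × Int))) (run : List Int),
    List.Pairwise (· < ·) (p :: rest) → StInv p t a groups run →
    (let r := ((p :: rest).zip rest).foldl stepP (t, a)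
     (r.1 ++ [r.2]).map PySem.Dict.items)
    = finishB (rest.foldl stepB (groups, run)) := by
  induction rest with
  | nil =>
    intro p t a groups run _ hinv
    simp only [List.zip_nil_right, List.foldl_nil, finishB]
    rcases hinv with ⟨h2, hlast, hpw, ht, ha⟩ | ⟨hrun, hc⟩
    · rw [if_pos h2]
      rw [if_neg (show ¬ (groups ++ [run.map (fun m => (m, 0))] = []) by simp)]
      subst ha ht
      simp [dictOf]
    · subst hrun
      rw [if_neg (show ¬ (2 ≤ ([p] : List Int).length) by simp)]
      rcases hc with ⟨hg, htt, ha⟩ | ⟨r, m, hr, ha, hm, hmp, hg⟩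
      · subst hg htt ha
        simp [dictOf]
      · rw [if_neg (show ¬ (groups = []) by rw [← hg]; simp)]
        rw [← hg]; simp
  | cons n rest' ih =>
    intro p t a groups run hpw hinv
    have hpn : p < n := (List.pairwise_cons.mp hpw).1 n (by simp)
    have hpw' : List.Pairwise (· < ·) (n :: rest') := (List.pairwise_cons.mp hpw).2
    simp only [List.zip_cons_cons, List.foldl_cons]
    have key : ∀ t' a' groups' run', stepP (t, a) (p, n) = (t', a') →
        stepB (groups, run) n = (groups', run') → StInv n t' a' groups' run' →
        (let r := ((n :: rest').zip rest').foldl stepP (stepP (t, a) (p, n))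
         (r.1 ++ [r.2]).map PySem.Dict.items)
        = finishB (rest'.foldl stepB (stepB (groups, run) n)) := by
      intro t' a' groups' run' h1 h2 hinv'
      rw [h1, h2]
      exact ih n t' a' groups' run' hpw' hinv'
    by_cases hn1 : n - p = 1
    · rcases hinv with ⟨h2, hlast, hpwr, ht, ha⟩ | ⟨hrun, hc⟩
      · -- C1: active run is extended by both loops
        have hmem : p ∈ run := List.mem_of_getLast? hlast
        have hbound : ∀ m ∈ run, m ≤ p := le_of_pairwise_getLast hpwr hlast
        have hnotmem : n ∉ run := fun hmm => by have := hbound n hmm; omega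
        have hrne : run ≠ [] := by intro hh; rw [hh] at h2; simp at h2
        refine key t (dictOf (run ++ [n])) groups (run ++ [n]) ?_ ?_ ?_
        · simp only [stepP, ha, keys_dictOf, PySem.List.pyGet?_neg_one, hlast]
          rw [if_pos (by simpa using hn1)]
          rw [if_neg (by simp)]
          rw [insert_dictOf_mem run p hmem, insert_dictOf_not_mem run n hnotmem]
        · simp only [stepB, PySem.List.pyGet?_neg_one, hlast]
          rw [if_pos ⟨hrne, by simpa using hn1⟩]
        · left
          refine ⟨by simp; omega, by simp, ?_, ht, rfl⟩
          rw [List.pairwise_append]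
          exact ⟨hpwr, by simp, fun m hm k hk => by simp at hk; subst hk; have := hbound m hm; omega⟩
      · subst hrun
        rcases hc with ⟨hg, htt, ha⟩ | ⟨r, m, hr, ha, hm, hmp, hg⟩
        · -- C2: nothing pending, a fresh run of two starts
          subst hg htt ha
          refine key [] (dictOf [p, n]) [] [p, n] ?_ ?_ ?_
          · simp only [stepP]
            rw [if_pos (by simpa using hn1)]
            rw [if_neg (by simp [dictOf])]
            rw [insert_dictOf_not_mem [] p (by simp)]
            rw [show ([] ++ [p] : List Int) = [p] from rfl]
            rw [insert_dictOf_not_mem [p] n (by simp; omega)]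
            rfl
          · simp only [stepB, PySem.List.pyGet?_neg_one]
            rw [if_pos ⟨by simp, by simp; omega⟩]
            rfl
          · left
            exact ⟨by simp, by simp, by simp [List.pairwise_cons]; omega, by simp, rfl⟩
        · -- C2: A flushes the pending run r, a fresh run of two starts
          refine key (t ++ [a]) (dictOf [p, n]) groups [p, n] ?_ ?_ ?_
          · simp only [stepP, ha, keys_dictOf, PySem.List.pyGet?_neg_one, hm]
            rw [if_pos (by simpa using hn1)]
            rw [if_pos ⟨by simp [dictOf]; exact hr, by simp; omega⟩]
            rw [show ((⟨[]⟩ : PySem.Dict Int Int)) = dictOf [] from rfl]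
            rw [insert_dictOf_not_mem [] p (by simp)]
            rw [show ([] ++ [p] : List Int) = [p] from rfl]
            rw [insert_dictOf_not_mem [p] n (by simp; omega)]
            rfl
          · simp only [stepB, PySem.List.pyGet?_neg_one]
            rw [if_pos ⟨by simp, by simp; omega⟩]
            rfl
          · left
            refine ⟨by simp, by simp, by simp [List.pairwise_cons]; omega, ?_, rfl⟩
            simpa using hg
    · -- gap: A does nothing, B closes the current run
      have hA : stepP (t, a) (p, n) = (t, a) := by
        simp only [stepP]
        rw [if_neg (by simpa using hn1)]
      rcases hinv with ⟨h2, hlast, hpwr, ht, ha⟩ | ⟨hrun, hc⟩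
      · refine key t a (groups ++ [run.map (fun m => (m, 0))]) [n] hA ?_ ?_
        · simp only [stepB, PySem.List.pyGet?_neg_one, hlast]
          rw [if_neg (by rintro ⟨-, hh⟩; simp at hh; omega)]
          rw [if_pos h2]
        · right
          refine ⟨rfl, Or.inr ⟨run, p, ?_, ha, hlast, by omega, ?_⟩⟩
          · intro hh; rw [hh] at h2; simp at h2
          · rw [ht.symm, ha]; simp [dictOf]
      · subst hrun
        rcases hc with ⟨hg, htt, ha⟩ | ⟨r, m, hr, ha, hm, hmp, hg⟩
        · subst hg htt ha
          refine key [] (dictOf []) [] [n] hA ?_ ?_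
          · simp only [stepB, PySem.List.pyGet?_neg_one]
            rw [if_neg (by rintro ⟨-, hh⟩; simp at hh; omega)]
            rw [if_neg (by simp)]
          · right
            exact ⟨rfl, Or.inl ⟨rfl, rfl, rfl⟩⟩
        · refine key t a groups [n] hA ?_ ?_
          · simp only [stepB, PySem.List.pyGet?_neg_one]
            rw [if_neg (by rintro ⟨-, hh⟩; simp at hh; omega)]
            rw [if_neg (by simp)]
          · right
            exact ⟨rfl, Or.inr ⟨r, m, hr, ha, hm, by omega, hg⟩⟩

-- ===== VERDICT (by name: the statement is the Claim_ definition above) =====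
theorem consecutive_composites_spec : Claim_equal_consecutive_composites := by
  unfold Claim_equal_consecutive_composites Spec_consecutive_composites
  intro x _
  show consecutive_composites x = consecutive_composites_alt x
  have hstep : stepA x = fun s j =>
      stepP s ((PySem.List.pyGet? (composite_listA x) j).getD 0,
               (PySem.List.pyGet? (composite_listA x) (j + 1)).getD 0) := rfl
  have hB : consecutive_composites_alt x
      = finishB ((composite_listA x).foldl stepB ([], [])) := by
    rw [comps_eq x]; rfl
  have hA : consecutive_composites x
      = (let r := ((composite_listA x).zip (composite_listA x).tail).foldl stepP
           ([], (⟨[]⟩ : PySem.Dict Int Int))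
         (r.1 ++ [r.2]).map PySem.Dict.items) := by
    show (let r := (PySem.List.pyRange 0 (((composite_listA x).length : Int) - 1)).foldl
             (stepA x) ([], (⟨[]⟩ : PySem.Dict Int Int))
          (r.1 ++ [r.2]).map PySem.Dict.items) = _
    rw [hstep, foldl_idx_zip (composite_listA x) stepP ([], (⟨[]⟩ : PySem.Dict Int Int))]
  rw [hA, hB]
  have hpwcl : List.Pairwise (· < ·) (composite_listA x) := by
    rw [comps_eq x]
    exact (PySem.List.pairwise_lt_pyRange_one 2 (x + 1)).filter _
  cases hcl : composite_listA x with
  | nil => rfl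
  | cons c rest =>
    rw [hcl] at hpwcl
    have hB1 : stepB ([], []) c = ([], [c]) := by
      simp only [stepB]
      rw [if_neg (by rintro ⟨hh, -⟩; exact hh rfl)]
      rfl
    simp only [List.tail_cons, List.foldl_cons, hB1]
    exact main_ind rest c [] (⟨[]⟩ : PySem.Dict Int Int) [] [c] hpwcl
      (Or.inr ⟨rfl, Or.inl ⟨rfl, rfl, rfl⟩⟩)
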